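-- pv_equiv track=rewrite | github.com/blueoxss/JOILang-Server | gpt_mg/version0_14/scripts/run_ga_search.py | _normalize_blocks
-- ===== SOURCE A (Python) =====
-- def _normalize_blocks(blocks: list[str]) -> list[str]:
--     ordered = []
--     for block_id in ["01", "02", "03", "06"]:
--         if block_id in blocks and block_id not in ordered:
--             ordered.append(block_id)
--     if "01" not in ordered:
--         ordered.insert(0, "01")
--     if "02" not in ordered:
--         ordered.insert(1 if ordered and ordered[0] == "01" else 0, "02")
--     return ordered
-- ===== SOURCE B (Python) =====
-- def _normalize_blocks(blocks: list[str]) -> list[str]: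
--     # Single pass over the INPUT, recording which optional ids appear;
--     # the two mandatory ids are emitted unconditionally up front.
--     has03 = False
--     has06 = False
--     for b in blocks:
--         if b == "03":
--             has03 = True
--         elif b == "06":
--             has06 = True
--     out = ["01", "02"]
--     if has03:
--         out.append("03")
--     if has06:
--         out.append("06")
--     return out
-- ===== Notes on version B (the rewrite author's own statement) =====
-- stated objective: alternative
-- what changed: A loops over the fixed candidate ids testing membership in the input and then patches the list with two conditional inserts; B instead makes one pass over the input setting two boolean flags for the optional ids and assembles the output unconditionally from the fixed prefix plus the flags.
import Mathlib
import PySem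

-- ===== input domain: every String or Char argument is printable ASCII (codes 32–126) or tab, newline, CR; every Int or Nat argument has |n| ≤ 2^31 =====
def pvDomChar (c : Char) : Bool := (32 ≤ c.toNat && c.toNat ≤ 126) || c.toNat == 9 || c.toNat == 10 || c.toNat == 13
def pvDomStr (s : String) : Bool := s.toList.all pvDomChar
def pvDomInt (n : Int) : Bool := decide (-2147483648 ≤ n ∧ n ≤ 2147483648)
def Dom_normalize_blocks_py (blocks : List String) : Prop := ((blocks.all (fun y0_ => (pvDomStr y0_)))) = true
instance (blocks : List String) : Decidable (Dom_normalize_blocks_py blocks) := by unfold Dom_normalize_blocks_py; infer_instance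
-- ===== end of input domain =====

-- B makes one pass over the input with two boolean flags for the optional ids and builds the
-- output from a fixed prefix, instead of A's candidate-membership loop with conditional inserts
-- (objective: alternative decomposition, same cost).

-- ===== PORT A =====
def normalize_blocks_py (blocks : List String) : List String :=
  let ordered :=
    ["01", "02", "03", "06"].foldl
      (fun ordered block_id =>
        if block_id ∈ blocks ∧ block_id ∉ ordered then ordered ++ [block_id] else ordered)
      []
  let ordered := if "01" ∉ ordered then PySem.List.insert ordered 0 "01" else ordered
  let ordered :=
    if "02" ∉ ordered then
      PySem.List.insert ordered
        (if ordered ≠ [] ∧ ordered.headI = "01" then 1 else 0) "02"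
    else ordered
  ordered

-- ===== PORT B =====
def normalize_blocks_py_alt (blocks : List String) : List String :=
  let flags :=
    blocks.foldl
      (fun (p : Bool × Bool) b =>
        if b = "03" then (true, p.2) else if b = "06" then (p.1, true) else p)
      (false, false)
  let out := ["01", "02"]
  let out := if flags.1 then out ++ ["03"] else out
  let out := if flags.2 then out ++ ["06"] else out
  out

-- ===== PRECONDITION & SPEC =====
def Spec_normalize_blocks_py (blocks : List String) (out : List String) : Prop := out = normalize_blocks_py_alt blocks
instance (blocks : List String) (out : List String) : Decidable (Spec_normalize_blocks_py blocks out) := by unfold Spec_normalize_blocks_py; infer_instance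

-- ===== CLAIM (what is proved, stated in full; the proofs are below) =====
def Claim_equal_normalize_blocks_py : Prop := ∀ (blocks : List String), Dom_normalize_blocks_py blocks → Spec_normalize_blocks_py blocks (normalize_blocks_py blocks)

-- ===== LEMMAS AND PROOFS =====

-- B's flag fold computes exactly the membership of "03" and "06" in the input.
theorem flags_eq_mem (blocks : List String) (a b : Bool) :
    blocks.foldl
      (fun (p : Bool × Bool) s =>
        if s = "03" then (true, p.2) else if s = "06" then (p.1, true) else p)
      (a, b)
    = (a || decide ("03" ∈ blocks), b || decide ("06" ∈ blocks)) := by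
  induction blocks generalizing a b with
  | nil => simp
  | cons x xs ih =>
    by_cases h3 : x = "03"
    · simp [h3, ih]
    · by_cases h6 : x = "06" <;>
        simp [h3, h6, ih, eq_comm]

-- ===== VERDICT (by name: the statement is the Claim_ definition above) =====
theorem normalize_blocks_py_spec : Claim_equal_normalize_blocks_py := by
  intro blocks _
  unfold Spec_normalize_blocks_py normalize_blocks_py normalize_blocks_py_alt
  by_cases h1 : "01" ∈ blocks <;> by_cases h2 : "02" ∈ blocks <;>
    by_cases h3 : "03" ∈ blocks <;> by_cases h6 : "06" ∈ blocks <;>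
    simp [h1, h2, h3, h6, List.foldl, PySem.List.insert, PySem.List.sliceIndices, flags_eq_mem]
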